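-- pv_equiv track=rewrite | github.com/KingBaruh/ZeroToHeroPython | Level0/marton2.py | getA_sum
-- ===== SOURCE A (Python) =====
-- def getA_sum(A):
--     M, N = len(A), len(A[0])
--     A_sum = [[0] * N for _ in range(M)]
--
--     # Bottom-right corner
--     A_sum[M - 1][N - 1] = A[M - 1][N - 1]
--
--     # Bottom row
--     for j in range(N - 2, -1, -1):
--         A_sum[M - 1][j] = A_sum[M - 1][j + 1] + A[M - 1][j]
--
--     # Right column
--     for i in range(M - 2, -1, -1):
--         A_sum[i][N - 1] = A_sum[i + 1][N - 1] + A[i][N - 1]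
--
--     # Rest of the array
--     for i in range(M - 2, -1, -1):
--         for j in range(N - 2, -1, -1):
--             A_sum[i][j] = (A[i][j] + A_sum[i + 1][j] +
--                            A_sum[i][j + 1] - A_sum[i + 1][j + 1])
--
--     return A_sum
-- ===== SOURCE B (Python) =====
-- def getA_sum(A):
--     M, N = len(A), len(A[0])
--     # pass 1: row-wise right-suffix sums over the first N columns
--     R = []
--     for row in A:
--         acc = 0
--         suf = []
--         for j in range(N - 1, -1, -1):
--             acc += row[j]
--             suf.append(acc)
--         suf.reverse()
--         R.append(suf)
--     # pass 2: column-wise bottom-suffix sums over R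
--     below = [0] * N
--     out = []
--     for r in reversed(R):
--         below = [x + y for x, y in zip(r, below)]
--         out.append(below)
--     out.reverse()
--     return out
-- ===== Notes on version B (the rewrite author's own statement) =====
-- stated objective: alternative
-- what changed: Replaces the inclusion-exclusion DP with its corner/bottom-row/right-column special cases by two separable passes: a row-wise right-suffix pass followed by a column-wise bottom-suffix zip, with no subtraction and no index special-casing.
import Mathlib
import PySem

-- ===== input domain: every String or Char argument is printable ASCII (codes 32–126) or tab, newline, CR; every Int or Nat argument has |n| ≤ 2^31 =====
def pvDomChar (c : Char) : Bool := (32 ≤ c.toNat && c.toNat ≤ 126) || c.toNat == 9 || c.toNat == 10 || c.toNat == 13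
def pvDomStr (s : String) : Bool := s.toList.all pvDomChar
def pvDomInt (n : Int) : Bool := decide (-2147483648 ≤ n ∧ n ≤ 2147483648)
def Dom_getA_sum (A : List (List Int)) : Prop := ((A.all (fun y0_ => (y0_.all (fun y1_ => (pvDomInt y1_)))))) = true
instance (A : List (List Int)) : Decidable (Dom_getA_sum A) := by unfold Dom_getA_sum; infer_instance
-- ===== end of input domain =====

-- B replaces A's inclusion-exclusion DP by two separable suffix-sum passes (row pass, then column pass);
-- equivalence of the two (integer-exact) is proved on rectangular-enough nonempty inputs (Pre_).

-- ===== PORT A =====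
-- matrix read S[i][j] / write S[i][j] = v; exact for the in-range nonnegative indices Pre_ guarantees
def pvGet2 (S : List (List Int)) (i j : Int) : Int :=
  PySem.List.pyGetD (PySem.List.pyGetD S i []) j 0

def pvSet2 (S : List (List Int)) (i j : Int) (v : Int) : List (List Int) :=
  PySem.List.pySetD S i (PySem.List.pySetD (PySem.List.pyGetD S i []) j v)

def getA_sum (A : List (List Int)) : List (List Int) :=
  let M : Int := A.length
  let N : Int := (A.headD []).length
  let S0 : List (List Int) := (List.range M.toNat).map (fun _ => List.replicate N.toNat 0)
  -- bottom-right corner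
  let S1 := pvSet2 S0 (M - 1) (N - 1) (pvGet2 A (M - 1) (N - 1))
  -- bottom row
  let S2 := (PySem.List.pyRange (N - 2) (-1) (-1)).foldl
      (fun S j => pvSet2 S (M - 1) j (pvGet2 S (M - 1) (j + 1) + pvGet2 A (M - 1) j)) S1
  -- right column
  let S3 := (PySem.List.pyRange (M - 2) (-1) (-1)).foldl
      (fun S i => pvSet2 S i (N - 1) (pvGet2 S (i + 1) (N - 1) + pvGet2 A i (N - 1))) S2
  -- rest of the array
  (PySem.List.pyRange (M - 2) (-1) (-1)).foldl
      (fun S i => (PySem.List.pyRange (N - 2) (-1) (-1)).foldl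
        (fun S j => pvSet2 S i j
          (pvGet2 A i j + pvGet2 S (i + 1) j + pvGet2 S i (j + 1) - pvGet2 S (i + 1) (j + 1))) S) S3

-- ===== PORT B =====
-- right-suffix sums of row over columns [0, N): acc/append loop of Source B, then reverse
def pvRowSuf (N : Int) (row : List Int) : List Int :=
  ((PySem.List.pyRange (N - 1) (-1) (-1)).foldl
      (fun (p : Int × List Int) j =>
        (p.1 + PySem.List.pyGetD row j 0, p.2 ++ [p.1 + PySem.List.pyGetD row j 0]))
      (0, [])).2.reverse

def getA_sum_alt (A : List (List Int)) : List (List Int) :=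
  let N : Int := (A.headD []).length
  let R := A.map (pvRowSuf N)
  ((R.reverse.foldl
      (fun (p : List Int × List (List Int)) r =>
        (List.zipWith (fun x y => x + y) r p.1,
         p.2 ++ [List.zipWith (fun x y => x + y) r p.1]))
      (List.replicate N.toNat 0, [])).2).reverse

-- ===== PRECONDITION & SPEC =====
-- Pre_ excludes exactly the inputs where A raises IndexError: the empty list (A[0]),
-- an empty first row (assignment A_sum[M-1][-1]), and rows shorter than N (reads A[i][j], j < N).
def Pre_getA_sum (A : List (List Int)) : Prop :=
  A ≠ [] ∧ 0 < (A.headD []).length ∧ ∀ row ∈ A, (A.headD []).length ≤ row.length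
instance (A : List (List Int)) : Decidable (Pre_getA_sum A) := by unfold Pre_getA_sum; infer_instance

def pvWitness_getA_sum : List (List Int) := [[1, 2], [3, 4]]

def Spec_getA_sum (A : List (List Int)) (out : List (List Int)) : Prop := out = getA_sum_alt A
instance (A : List (List Int)) (out : List (List Int)) : Decidable (Spec_getA_sum A out) := by unfold Spec_getA_sum; infer_instance

-- ===== CLAIM (what is proved, stated in full; the proofs are below) =====
def Claim_equal_getA_sum : Prop := ∀ (A : List (List Int)), Dom_getA_sum A → Pre_getA_sum A → Spec_getA_sum A (getA_sum A)

-- ===== LEMMAS AND PROOFS =====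

-- reference: suffix sums of a row (sufList [a,b,c] = [a+b+c, b+c, c])
def sufList : List Int → List Int
  | [] => []
  | a :: rest => (a + (sufList rest).headD 0) :: sufList rest

-- reference: column-wise bottom-suffix combination with bottom default b
def specCb (b : List Int) : List (List Int) → List (List Int)
  | [] => []
  | r :: rest => List.zipWith (fun x y => x + y) r ((specCb b rest).headD b) :: specCb b rest

-- the common value both programs compute
def pvF (n : ℕ) (A : List (List Int)) : List (List Int) :=
  specCb (List.replicate n 0) (A.map (fun row => sufList (row.take n)))

-- descending loop "for k in range(n-1, -1, -1)" as a foldr over range n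
theorem pv_foldl_desc {α : Type} (f : α → Int → α) (s : α) (n : ℕ) :
    (PySem.List.pyRange ((n : Int) - 1) (-1) (-1)).foldl f s
      = (List.range n).foldr (fun (k : ℕ) a => f a (k : Int)) s := by
  rw [PySem.List.pyRange_neg_one_eq_reverse, show (-1:Int)+1 = 0 by ring,
    show ((n:Int)-1)+1 = (n:Int) by ring, PySem.List.pyRange_zero_nat,
    List.foldl_reverse]
  exact List.foldr_map ..

-- foldr over range n carrying an indexed invariant
theorem pv_foldr_range_eq {α : Type} (f : ℕ → α → α) (g : ℕ → α) (n : ℕ)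
    (h : ∀ k < n, f k (g (k + 1)) = g k) :
    (List.range n).foldr f (g n) = g 0 := by
  induction n with
  | zero => rfl
  | succ n ih =>
    rw [List.range_succ, List.foldr_append]
    simp only [List.foldr_cons, List.foldr_nil]
    rw [h n (by omega)]
    exact ih (fun k hk => h k (by omega))

-- ---- small list facts used throughout ----
theorem pv_set_append_cons {α : Type} (l : List α) (x : α) (t : List α) (v : α) :
    (l ++ x :: t).set l.length v = l ++ v :: t := by
  induction l with
  | nil => rfl
  | cons a l ih => simp [ih]

theorem pv_getD_append_cons {α : Type} (l : List α) (x : α) (t : List α) (d : α) :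
    (l ++ x :: t).getD l.length d = x := by
  simp [List.getD]

theorem pv_getD_rep_lt {α : Type} (c : α) (k : ℕ) (t : List α) (i : ℕ) (d : α) (h : i < k) :
    (List.replicate k c ++ t).getD i d = c := by
  have h' : i < (List.replicate k c).length := by simpa using h
  rw [List.getD, List.getElem?_append_left h']
  simp [h]

theorem pv_getD_rep_ge {α : Type} (c : α) (k : ℕ) (t : List α) (i : ℕ) (d : α) (h : k ≤ i) :
    (List.replicate k c ++ t).getD i d = t.getD (i - k) d := by
  have h' : (List.replicate k c).length ≤ i := by simpa using h
  rw [List.getD, List.getElem?_append_right h']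
  simp [List.getD]

theorem pv_getD_cons_ge {α : Type} (l : List α) (x : α) (t : List α) (i : ℕ) (d : α)
    (h : l.length < i) : (l ++ x :: t).getD i d = t.getD (i - l.length - 1) d := by
  rw [List.getD, List.getElem?_append_right (by omega)]
  rcases Nat.exists_eq_add_of_lt h with ⟨j, rfl⟩
  have e : l.length + j + 1 - l.length = j + 1 := by omega
  rw [e, List.getElem?_cons_succ]
  have e2 : l.length + j + 1 - l.length - 1 = j := by omega
  simp [List.getD]

theorem pv_getD_drop {α : Type} (l : List α) (j i : ℕ) (d : α) :
    (l.drop j).getD i d = l.getD (j + i) d := by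
  simp [List.getD, List.getElem?_drop]

theorem pv_mat_step {α : Type} (c : α) (k : ℕ) (t : List α) (v : α) :
    (List.replicate (k + 1) c ++ t).set k v = List.replicate k c ++ v :: t := by
  rw [List.replicate_succ', List.append_assoc, List.singleton_append]
  have := pv_set_append_cons (List.replicate k c) c t v
  simpa using this

theorem pv_set_rep_self {α : Type} (c : α) (k : ℕ) (x : α) (t : List α) (v : α) :
    (List.replicate k c ++ x :: t).set k v = List.replicate k c ++ v :: t := by
  have := pv_set_append_cons (List.replicate k c) x t v
  simpa using this

theorem pv_row_step (s : List Int) (k : ℕ) (hk : k < s.length) :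
    (List.replicate (k + 1) 0 ++ s.drop (k + 1)).set k (s.getD k 0)
      = List.replicate k 0 ++ s.drop k := by
  rw [pv_mat_step, List.getD_eq_getElem _ _ hk, ← List.drop_eq_getElem_cons hk]

theorem pv_getD_rep_self {α : Type} (c : α) (k : ℕ) (x : α) (t : List α) (d : α) :
    (List.replicate k c ++ x :: t).getD k d = x := by
  have := pv_getD_append_cons (List.replicate k c) x t d
  simpa using this

theorem pv_zip_zero (l : List Int) (k : ℕ) (h : l.length ≤ k) :
    List.zipWith (fun x y => x + y) l (List.replicate k 0) = l := by
  induction l generalizing k with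
  | nil => rfl
  | cons a l ih => cases k with
    | zero => simp at h
    | succ k => simp [List.replicate_succ, ih k (by simpa using h)]

theorem pv_zip_getD (u v : List Int) (j : ℕ) (hj : j < u.length) (hv : j < v.length) :
    (List.zipWith (fun x y => x + y) u v).getD j 0 = u.getD j 0 + v.getD j 0 := by
  rw [List.getD_eq_getElem _ _ (by simp; omega), List.getD_eq_getElem _ _ hj,
    List.getD_eq_getElem _ _ hv]
  simp

-- ---- sufList facts ----
theorem sufList_length (l : List Int) : (sufList l).length = l.length := by
  induction l with
  | nil => rfl
  | cons a l ih => simp [sufList, ih]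

theorem sufList_getD (l : List Int) (j : ℕ) : (sufList l).getD j 0 = (l.drop j).sum := by
  induction l generalizing j with
  | nil => simp [sufList]
  | cons a l ih =>
    cases j with
    | zero =>
      have hh : (sufList l).headD 0 = (sufList l).getD 0 0 := by cases sufList l <;> rfl
      have h0 := ih 0
      simp only [sufList, List.getD_cons_zero, List.drop_zero, List.sum_cons, hh, h0]
    | succ j =>
      simpa only [sufList, List.getD_cons_succ, List.drop_succ_cons] using ih j

theorem sufList_append_singleton (l : List Int) (x : Int) :
    sufList (l ++ [x]) = (sufList l).map (· + x) ++ [x] := by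
  induction l with
  | nil => simp [sufList]
  | cons a l ih =>
    simp only [List.cons_append, sufList, ih, List.map_cons, List.cons.injEq]
    refine ⟨?_, trivial⟩
    cases h : sufList l with
    | nil => simp
    | cons b r => simp; ring

theorem sufTake_step (l : List Int) (n k : ℕ) (hk : k < n) (hn : n ≤ l.length) :
    (sufList (l.take n)).getD k 0 = l.getD k 0 + (sufList (l.take n)).getD (k + 1) 0 := by
  have hkl : k < (l.take n).length := by simp; omega
  rw [sufList_getD, sufList_getD, List.drop_eq_getElem_cons hkl, List.sum_cons]
  have : (l.take n)[k] = l[k]'(by omega) := List.getElem_take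
  rw [this, List.getD_eq_getElem _ _ (by omega)]

theorem sufTake_top (l : List Int) (n : ℕ) (hn : n ≤ l.length) :
    (sufList (l.take n)).getD n 0 = 0 := by
  rw [sufList_getD]
  have : (l.take n).drop n = [] := List.drop_of_length_le (by simp)
  simp [this]

-- ---- specCb facts ----
theorem specCb_length (b : List Int) (rows : List (List Int)) :
    (specCb b rows).length = rows.length := by
  induction rows with
  | nil => rfl
  | cons r rest ih => simp [specCb, ih]

theorem specCb_row_len (b : List Int) (rows : List (List Int))
    (hb : ∀ r ∈ rows, r.length = b.length) :
    ∀ r ∈ specCb b rows, r.length = b.length := by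
  induction rows with
  | nil => intro r hr; simp [specCb] at hr
  | cons r rest ih =>
    intro q hq
    simp only [specCb, List.mem_cons] at hq
    rcases hq with rfl | hq
    · have h1 : r.length = b.length := hb r (by simp)
      have h2 : ((specCb b rest).headD b).length = b.length := by
        cases h : specCb b rest with
        | nil => rfl
        | cons s ss => exact ih (fun q hq => hb q (by simp [hq])) s (by simp [h])
      rw [List.length_zipWith, h1, h2, Nat.min_self]
    · exact ih (fun q hq' => hb q (by simp [hq'])) q hq

theorem specCb_getD (b : List Int) (rows : List (List Int)) (i : ℕ) (hi : i < rows.length) :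
    (specCb b rows).getD i b
      = List.zipWith (fun x y => x + y) (rows.getD i []) ((specCb b rows).getD (i + 1) b) := by
  induction rows generalizing i with
  | nil => simp at hi
  | cons r rest ih =>
    cases i with
    | zero =>
      have hh : (specCb b rest).headD b = (specCb b rest).getD 0 b := by cases specCb b rest <;> rfl
      show List.zipWith (fun x y => x + y) r ((specCb b rest).headD b) = _
      rw [hh]; rfl
    | succ i =>
      show (specCb b rest).getD i b = _
      rw [ih i (by simpa using hi)]; rfl

-- ---- port bridges ----
theorem pvGet2_natCast (S : List (List Int)) (i j : ℕ) :
    pvGet2 S (i : Int) (j : Int) = (S.getD i []).getD j 0 := by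
  simp [pvGet2]

theorem pvSet2_natCast (S : List (List Int)) (i j : ℕ) (v : Int) :
    pvSet2 S (i : Int) (j : Int) v = S.set i ((S.getD i []).set j v) := by
  simp [pvSet2]

-- ---- B-side characterization ----
theorem pvRowSuf_aux (row : List Int) :
    ∀ (n : ℕ), n ≤ row.length → ∀ (acc : Int) (out : List Int),
    (List.range n).foldr
        (fun (k : ℕ) (p : Int × List Int) =>
          (p.1 + row.getD k 0, p.2 ++ [p.1 + row.getD k 0])) (acc, out)
      = (acc + (row.take n).sum, out ++ ((sufList (row.take n)).map (· + acc)).reverse) := by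
  intro n
  induction n with
  | zero => intro _ acc out; simp [sufList]
  | succ n ih =>
    intro h acc out
    have hn : n < row.length := by omega
    rw [List.range_succ, List.foldr_append]
    simp only [List.foldr_cons, List.foldr_nil]
    rw [ih (by omega)]
    have ht : row.take (n + 1) = row.take n ++ [row[n]] := by
      rw [List.take_add_one, List.getElem?_eq_getElem hn]; rfl
    rw [ht, sufList_append_singleton, List.sum_append]
    have hf : ((fun v : Int => v + acc) ∘ (fun v : Int => v + row[n]))
        = (fun v : Int => v + (acc + row.getD n 0)) := by
      funext v; rw [List.getD_eq_getElem _ _ hn]; simp; ring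
    simp only [Prod.mk.injEq, List.map_append, List.map_map, hf, List.map_cons, List.map_nil,
      List.reverse_append, List.reverse_cons, List.reverse_nil, List.nil_append,
      List.append_assoc, List.singleton_append]
    constructor
    · rw [List.getD_eq_getElem _ _ hn]; simp; ring
    · rw [List.getD_eq_getElem _ _ hn]
      have : (row[n] + acc) = (acc + row[n]) := by ring
      rw [this]

theorem pvRowSuf_eq (row : List Int) (n : ℕ) (h : n ≤ row.length) :
    pvRowSuf (n : Int) row = sufList (row.take n) := by
  unfold pvRowSuf
  rw [pv_foldl_desc]
  simp only [PySem.List.pyGetD_natCast]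
  rw [pvRowSuf_aux row n h 0 []]
  simp

theorem pv_colfold (z : List Int) (Rs : List (List Int)) (out : List (List Int)) :
    Rs.reverse.foldl
        (fun (p : List Int × List (List Int)) r =>
          (List.zipWith (fun x y => x + y) r p.1,
           p.2 ++ [List.zipWith (fun x y => x + y) r p.1])) (z, out)
      = ((specCb z Rs).headD z, out ++ (specCb z Rs).reverse) := by
  induction Rs generalizing out with
  | nil => simp [specCb]
  | cons r rest ih =>
    rw [List.reverse_cons, List.foldl_append, ih]
    simp [specCb, List.append_assoc]

theorem alt_eq_pvF (A : List (List Int)) (hA : Pre_getA_sum A) :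
    getA_sum_alt A = pvF (A.headD []).length A := by
  obtain ⟨hne, hn0, hrows⟩ := hA
  simp only [getA_sum_alt]
  rw [List.map_congr_left (fun row hrow =>
    pvRowSuf_eq row (A.headD []).length (hrows row hrow))]
  rw [pv_colfold]
  simp [pvF]

-- ---- A-side characterization ----
-- loop-invariant shapes of the mutable matrix during A's four passes
def pvG2 (m : ℕ) (zrow s : List Int) (j : ℕ) : List (List Int) :=
  List.replicate (m - 1) zrow ++ [List.replicate j 0 ++ s.drop j]

def pvColRows (m n : ℕ) (zrow s : List Int) (c : ℕ → Int) : List (List Int) :=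
  (List.range (m - 1)).map (fun i => zrow.set (n - 1) (c i)) ++ [s]

def pvG3 (zrow : List Int) (colRows : List (List Int)) (k : ℕ) : List (List Int) :=
  List.replicate k zrow ++ colRows.drop k

def pvG4 (colRows F : List (List Int)) (k : ℕ) : List (List Int) :=
  colRows.take k ++ F.drop k

def pvGIn (colRows F : List (List Int)) (k j : ℕ) : List (List Int) :=
  colRows.take k ++ (List.replicate j 0 ++ (F.getD k []).drop j) :: F.drop (k + 1)

theorem a_eq_pvF (A : List (List Int)) (hA : Pre_getA_sum A) :
    getA_sum A = pvF (A.headD []).length A := by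
  obtain ⟨hne, hn0, hrows⟩ := hA
  set n := (A.headD []).length with hndef
  set m := A.length with hmdef
  have hm1 : 1 ≤ m := by
    cases A with
    | nil => exact absurd rfl hne
    | cons a t => simp [hmdef]
  set zrow : List Int := List.replicate n 0 with hzrow
  set rows : List (List Int) := A.map (fun row => sufList (row.take n)) with hrowsdef
  set F : List (List Int) := specCb zrow rows with hFdef
  have hrowlen : ∀ i : ℕ, i < m → n ≤ (A.getD i []).length := by
    intro i hi
    rw [List.getD_eq_getElem _ _ (by omega)]
    exact hrows _ (List.getElem_mem _)
  have hFlen : F.length = m := by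
    rw [hFdef, specCb_length, hrowsdef, List.length_map]
  have hrows_len : ∀ r ∈ rows, r.length = zrow.length := by
    intro r hr
    rw [hrowsdef] at hr
    rcases List.mem_map.1 hr with ⟨row, hrow, rfl⟩
    rw [sufList_length, List.length_take, hzrow, List.length_replicate]
    exact Nat.min_eq_left (hrows row hrow)
  have hFgetDz : ∀ i : ℕ, i < m → F.getD i [] = F.getD i zrow := by
    intro i hi
    rw [List.getD_eq_getElem _ _ (by omega), List.getD_eq_getElem _ _ (by omega)]
  have hFzlen : ∀ i : ℕ, (F.getD i zrow).length = n := by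
    intro i
    by_cases h : i < m
    · have hmem : F.getD i zrow ∈ F := by
        rw [List.getD_eq_getElem _ _ (by omega)]; exact List.getElem_mem _
      have := specCb_row_len zrow rows hrows_len _ (hFdef ▸ hmem)
      simpa [hzrow] using this
    · rw [List.getD_eq_default _ _ (by omega)]
      simp [hzrow]
  have hrowsgetD : ∀ i : ℕ, i < m → rows.getD i [] = sufList ((A.getD i []).take n) := by
    intro i hi
    rw [hrowsdef, List.getD_eq_getElem _ _ (by simpa using hi),
      List.getElem_map, List.getD_eq_getElem _ _ (by omega)]
  have hFrec : ∀ i : ℕ, i < m →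
      F.getD i zrow
        = List.zipWith (fun x y => x + y) (sufList ((A.getD i []).take n)) (F.getD (i + 1) zrow) := by
    intro i hi
    have := specCb_getD zrow rows i (by rwa [hrowsdef, List.length_map])
    rw [← hFdef] at this
    rw [this, hrowsgetD i hi]
  have hFtopz : F.getD m zrow = zrow := List.getD_eq_default _ _ (by omega)
  set lastrow := A.getD (m - 1) [] with hlastdef
  set s := sufList (lastrow.take n) with hsdef
  have hslen : s.length = n := by
    rw [hsdef, sufList_length, List.length_take]
    exact Nat.min_eq_left (hrowlen (m - 1) (by omega))
  have hFlast : F.getD (m - 1) zrow = s := by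
    rw [hFrec (m - 1) (by omega), show m - 1 + 1 = m by omega, hFtopz, ← hlastdef, ← hsdef, hzrow]
    exact pv_zip_zero s n (by omega)
  set c : ℕ → Int := fun i => (F.getD i zrow).getD (n - 1) 0 with hcdef
  have hc_rec : ∀ i : ℕ, i < m → c i = (A.getD i []).getD (n - 1) 0 + c (i + 1) := by
    intro i hi
    show (F.getD i zrow).getD (n - 1) 0 = _
    have hrl := hrowlen i hi
    rw [hFrec i hi,
      pv_zip_getD _ _ _ (by rw [sufList_length, List.length_take]; omega)
        (by rw [hFzlen]; omega)]
    congr 1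
    rw [sufTake_step _ n (n - 1) (by omega) (hrowlen i hi), show n - 1 + 1 = n by omega,
      sufTake_top _ n (hrowlen i hi), add_zero]
  have hstop : s.getD (n - 1) 0 = lastrow.getD (n - 1) 0 := by
    rw [hsdef, sufTake_step _ n (n - 1) (by omega) (hrowlen (m - 1) (by omega)),
      show n - 1 + 1 = n by omega, sufTake_top _ n (hrowlen (m - 1) (by omega)), add_zero]
  have hclast : c (m - 1) = lastrow.getD (n - 1) 0 := by
    show (F.getD (m - 1) zrow).getD (n - 1) 0 = _
    rw [hFlast, hstop]
  -- now unfold the port and replay the four passes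
  simp only [getA_sum, ← hmdef, ← hndef]
  have e1 : (m : Int) - 1 = ((m - 1 : ℕ) : Int) := by omega
  have e2 : (n : Int) - 1 = ((n - 1 : ℕ) : Int) := by omega
  have e3 : (m : Int) - 2 = ((m - 1 : ℕ) : Int) - 1 := by omega
  have e4 : (n : Int) - 2 = ((n - 1 : ℕ) : Int) - 1 := by omega
  have hS0 : List.map (fun _ : ℕ => List.replicate n (0 : Int)) (List.range m)
      = List.replicate m zrow := by
    simp [hzrow, List.map_const']
  simp only [e1, e3, e4, Int.toNat_natCast, pv_foldl_desc, e2, hS0]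
  -- stage 1: corner assignment
  have hsdrop : s.drop (n - 1) = [lastrow.getD (n - 1) 0] := by
    rw [List.drop_eq_getElem_cons (by omega), List.drop_of_length_le (by omega)]
    congr 1
    rw [← hstop]
    exact (List.getD_eq_getElem _ _ (by omega)).symm
  have hzsplit : zrow = List.replicate ((n - 1) + 1) (0 : Int) ++ [] := by
    rw [List.append_nil, hzrow]; congr 1; omega
  have hzset : ∀ v : Int, zrow.set (n - 1) v = List.replicate (n - 1) 0 ++ [v] := by
    intro v
    rw [hzsplit, pv_mat_step]
  have hgd : (List.replicate m zrow).getD (m - 1) [] = zrow := by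
    rw [List.getD_eq_getElem _ _ (by simpa using by omega)]
    exact List.getElem_replicate _
  have hrepm : List.replicate m zrow = List.replicate ((m - 1) + 1) zrow ++ [] := by
    rw [List.append_nil]; congr 1; omega
  have hS1 : pvSet2 (List.replicate m zrow) (↑(m - 1)) (↑(n - 1)) (pvGet2 A (↑(m - 1)) (↑(n - 1)))
      = pvG2 m zrow s (n - 1) := by
    rw [pvSet2_natCast, pvGet2_natCast, ← hlastdef, hgd, hzset, ← hsdrop]
    rw [hrepm, pv_mat_step]
    rfl
  rw [hS1]
  -- stage 2: bottom row
  have hlastlen : n ≤ lastrow.length := hrowlen (m - 1) (by omega)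
  have step2 : ∀ k, k < n - 1 →
      (fun (k : ℕ) (a : List (List Int)) =>
        pvSet2 a (↑(m - 1)) (↑k)
          (pvGet2 a (↑(m - 1)) (↑k + 1) + pvGet2 A (↑(m - 1)) (↑k))) k (pvG2 m zrow s (k + 1))
        = pvG2 m zrow s k := by
    intro k hk
    show pvSet2 (pvG2 m zrow s (k + 1)) (↑(m - 1)) (↑k)
        (pvGet2 (pvG2 m zrow s (k + 1)) (↑(m - 1)) (↑k + 1) + pvGet2 A (↑(m - 1)) (↑k))
        = pvG2 m zrow s k
    have ek : ((k : ℕ) : Int) + 1 = (((k + 1 : ℕ) : ℕ) : Int) := by push_cast; ring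
    rw [ek, pvGet2_natCast, pvGet2_natCast, pvSet2_natCast, ← hlastdef]
    simp only [pvG2]
    rw [pv_getD_rep_self, pv_getD_rep_ge _ _ _ _ _ (le_refl (k + 1)), Nat.sub_self,
      pv_getD_drop, Nat.add_zero]
    have hv : s.getD (k + 1) 0 + lastrow.getD k 0 = s.getD k 0 := by
      rw [hsdef, sufTake_step lastrow n k (by omega) hlastlen]; ring
    rw [hv, pv_row_step s k (by omega), pv_set_rep_self]
  rw [pv_foldr_range_eq
    (fun (k : ℕ) (a : List (List Int)) =>
      pvSet2 a (↑(m - 1)) (↑k)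
        (pvGet2 a (↑(m - 1)) (↑k + 1) + pvGet2 A (↑(m - 1)) (↑k)))
    (pvG2 m zrow s) (n - 1) step2]
  -- stage 3: right column
  set colRows := pvColRows m n zrow s c with hcrdef
  have hcr_split : colRows = (List.range (m - 1)).map (fun i => zrow.set (n - 1) (c i)) ++ s :: [] := by
    rw [hcrdef]; rfl
  have hcr_len : colRows.length = m := by
    rw [hcrdef, pvColRows]; simp; omega
  have hcr_getD_lt : ∀ i : ℕ, i < m - 1 → colRows.getD i [] = zrow.set (n - 1) (c i) := by
    intro i hi
    rw [hcr_split, List.getD_eq_getElem _ _ (by simp; omega),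
      List.getElem_append_left (by simp; omega), List.getElem_map]
    simp
  have hcr_last : colRows.getD (m - 1) [] = s := by
    have h := pv_getD_append_cons ((List.range (m - 1)).map (fun i => zrow.set (n - 1) (c i))) s
      ([] : List (List Int)) ([] : List Int)
    rw [List.length_map, List.length_range] at h
    rw [hcr_split, h]
  have hcr_val : ∀ i : ℕ, i < m → (colRows.getD i []).getD (n - 1) 0 = c i := by
    intro i hi
    by_cases h : i < m - 1
    · rw [hcr_getD_lt i h, List.getD_eq_getElem _ _ (by simp [hzrow]; omega)]
      rw [List.getElem_set_self]
    · have hieq : i = m - 1 := by omega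
      rw [hieq, hcr_last, hstop, hclast]
  have hbase3 : pvG2 m zrow s 0 = pvG3 zrow colRows (m - 1) := by
    rw [pvG2, pvG3, hcr_split]
    have h : (((List.range (m - 1)).map (fun i => zrow.set (n - 1) (c i))) ++ s :: []).drop (m - 1)
        = s :: [] := List.drop_left' (by simp)
    rw [h]
    simp
  rw [hbase3]
  have step3 : ∀ k, k < m - 1 →
      (fun (k : ℕ) (a : List (List Int)) =>
        pvSet2 a (↑k) (↑(n - 1))
          (pvGet2 a (↑k + 1) (↑(n - 1)) + pvGet2 A (↑k) (↑(n - 1)))) k (pvG3 zrow colRows (k + 1))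
        = pvG3 zrow colRows k := by
    intro k hk
    show pvSet2 (pvG3 zrow colRows (k + 1)) (↑k) (↑(n - 1))
        (pvGet2 (pvG3 zrow colRows (k + 1)) (↑k + 1) (↑(n - 1)) + pvGet2 A (↑k) (↑(n - 1)))
        = pvG3 zrow colRows k
    have ek : ((k : ℕ) : Int) + 1 = (((k + 1 : ℕ) : ℕ) : Int) := by push_cast; ring
    rw [ek, pvGet2_natCast, pvGet2_natCast, pvSet2_natCast]
    simp only [pvG3]
    rw [pv_getD_rep_ge _ _ _ _ _ (le_refl (k + 1)), Nat.sub_self, pv_getD_drop, Nat.add_zero,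
      hcr_val (k + 1) (by omega), pv_getD_rep_lt _ _ _ _ _ (by omega)]
    have hv : c (k + 1) + (A.getD k []).getD (n - 1) 0 = c k := by
      rw [hc_rec k (by omega)]; ring
    rw [hv, pv_mat_step, ← hcr_getD_lt k hk,
      List.getD_eq_getElem _ _ (by omega), ← List.drop_eq_getElem_cons (by omega)]
  rw [pv_foldr_range_eq
    (fun (k : ℕ) (a : List (List Int)) =>
      pvSet2 a (↑k) (↑(n - 1))
        (pvGet2 a (↑k + 1) (↑(n - 1)) + pvGet2 A (↑k) (↑(n - 1))))
    (pvG3 zrow colRows) (m - 1) step3]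
  -- stage 4: the double loop
  have hFdroplast : F.drop (m - 1) = [s] := by
    rw [List.drop_eq_getElem_cons (by omega), List.drop_of_length_le (by omega)]
    congr 1
    rw [← List.getD_eq_getElem F ([] : List Int) (show m - 1 < F.length by omega),
      hFgetDz (m - 1) (by omega), hFlast]
  have hbase4 : pvG3 zrow colRows 0 = pvG4 colRows F (m - 1) := by
    rw [pvG3, pvG4, List.drop_zero, List.replicate_zero, List.nil_append, hFdroplast]
    rw [hcr_split]
    have h : (((List.range (m - 1)).map (fun i => zrow.set (n - 1) (c i))) ++ s :: []).take (m - 1)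
        = ((List.range (m - 1)).map (fun i => zrow.set (n - 1) (c i))) := List.take_left' (by simp)
    rw [h]
  rw [hbase4]
  have step4 : ∀ k, k < m - 1 →
      (fun (k : ℕ) (a : List (List Int)) =>
        (List.range (n - 1)).foldr
          (fun (j : ℕ) (a : List (List Int)) =>
            pvSet2 a (↑k) (↑j)
              (pvGet2 A (↑k) (↑j) + pvGet2 a (↑k + 1) (↑j) + pvGet2 a (↑k) (↑j + 1)
                - pvGet2 a (↑k + 1) (↑j + 1))) a) k (pvG4 colRows F (k + 1))
        = pvG4 colRows F k := by
    intro k hk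
    have hFk := hFgetDz k (by omega)
    have hFk1 := hFgetDz (k + 1) (by omega)
    have hFklen : (F.getD k []).length = n := by rw [hFk, hFzlen]
    have hFk1len : (F.getD (k + 1) []).length = n := by rw [hFk1, hFzlen]
    have htklen : (colRows.take k).length = k := by
      rw [List.length_take]; omega
    have hFkdrop : (F.getD k []).drop (n - 1) = [c k] := by
      rw [List.drop_eq_getElem_cons (by omega), List.drop_of_length_le (by omega)]
      congr 1
      rw [← List.getD_eq_getElem (F.getD k []) (0 : Int)
        (show n - 1 < (F.getD k []).length by omega), hFk, hcdef]
    have htake : colRows.take (k + 1) = colRows.take k ++ [colRows.getD k []] := by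
      rw [List.take_add_one, List.getElem?_eq_getElem (show k < colRows.length by omega),
        List.getD_eq_getElem _ _ (by omega)]
      rfl
    have hbaseIn : pvG4 colRows F (k + 1) = pvGIn colRows F k (n - 1) := by
      rw [pvG4, pvGIn, htake, hcr_getD_lt k hk, hzset, ← hFkdrop]
      simp [List.append_assoc]
    rw [hbaseIn]
    have stepIn : ∀ j, j < n - 1 →
        (fun (j : ℕ) (a : List (List Int)) =>
          pvSet2 a (↑k) (↑j)
            (pvGet2 A (↑k) (↑j) + pvGet2 a (↑k + 1) (↑j) + pvGet2 a (↑k) (↑j + 1)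
              - pvGet2 a (↑k + 1) (↑j + 1))) j (pvGIn colRows F k (j + 1))
          = pvGIn colRows F k j := by
      intro j hj
      show pvSet2 (pvGIn colRows F k (j + 1)) (↑k) (↑j)
          (pvGet2 A (↑k) (↑j) + pvGet2 (pvGIn colRows F k (j + 1)) (↑k + 1) (↑j)
            + pvGet2 (pvGIn colRows F k (j + 1)) (↑k) (↑j + 1)
            - pvGet2 (pvGIn colRows F k (j + 1)) (↑k + 1) (↑j + 1))
          = pvGIn colRows F k j
      have ek : ((k : ℕ) : Int) + 1 = (((k + 1 : ℕ) : ℕ) : Int) := by push_cast; ring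
      have ej : ((j : ℕ) : Int) + 1 = (((j + 1 : ℕ) : ℕ) : Int) := by push_cast; ring
      rw [ek, ej, pvGet2_natCast, pvGet2_natCast, pvGet2_natCast, pvGet2_natCast, pvSet2_natCast]
      have hrowk : (pvGIn colRows F k (j + 1)).getD k []
          = List.replicate (j + 1) 0 ++ (F.getD k []).drop (j + 1) := by
        have h := pv_getD_append_cons (colRows.take k)
          (List.replicate (j + 1) 0 ++ (F.getD k []).drop (j + 1)) (F.drop (k + 1)) ([] : List Int)
        rw [htklen] at h
        rw [pvGIn, h]
      have hrowk1 : (pvGIn colRows F k (j + 1)).getD (k + 1) [] = F.getD (k + 1) [] := by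
        rw [pvGIn]
        have h := pv_getD_cons_ge (colRows.take k)
          (List.replicate (j + 1) 0 ++ (F.getD k []).drop (j + 1)) (F.drop (k + 1)) (k + 1)
          ([] : List Int) (by omega)
        rw [htklen] at h
        rw [h, show k + 1 - k - 1 = 0 by omega, pv_getD_drop, Nat.add_zero]
      rw [hrowk, hrowk1,
        pv_getD_rep_ge _ _ _ _ _ (le_refl (j + 1)), Nat.sub_self, pv_getD_drop, Nat.add_zero]
      have hzipj := hFrec k (by omega)
      have hrl := hrowlen k (by omega)
      have hv1 : (F.getD k []).getD j 0
          = (sufList ((A.getD k []).take n)).getD j 0 + (F.getD (k + 1) []).getD j 0 := by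
        rw [hFk, hFk1, hzipj]
        exact pv_zip_getD _ _ _ (by rw [sufList_length, List.length_take]; omega)
          (by rw [hFzlen]; omega)
      have hv2 : (F.getD k []).getD (j + 1) 0
          = (sufList ((A.getD k []).take n)).getD (j + 1) 0 + (F.getD (k + 1) []).getD (j + 1) 0 := by
        rw [hFk, hFk1, hzipj]
        exact pv_zip_getD _ _ _ (by rw [sufList_length, List.length_take]; omega)
          (by rw [hFzlen]; omega)
      have hv3 : (sufList ((A.getD k []).take n)).getD j 0
          = (A.getD k []).getD j 0 + (sufList ((A.getD k []).take n)).getD (j + 1) 0 :=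
        sufTake_step _ n j (by omega) (hrowlen k (by omega))
      have hv : (A.getD k []).getD j 0 + (F.getD (k + 1) []).getD j 0 + (F.getD k []).getD (j + 1) 0
          - (F.getD (k + 1) []).getD (j + 1) 0 = (F.getD k []).getD j 0 := by
        rw [hv1, hv2, hv3]; ring
      rw [hv, pv_row_step _ j (by omega)]
      have h := pv_set_append_cons (colRows.take k)
        (List.replicate (j + 1) 0 ++ (F.getD k []).drop (j + 1)) (F.drop (k + 1))
        (List.replicate j 0 ++ (F.getD k []).drop j)
      rw [htklen] at h
      rw [pvGIn, pvGIn, h]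
    show (List.range (n - 1)).foldr
        (fun (j : ℕ) (a : List (List Int)) =>
          pvSet2 a (↑k) (↑j)
            (pvGet2 A (↑k) (↑j) + pvGet2 a (↑k + 1) (↑j) + pvGet2 a (↑k) (↑j + 1)
              - pvGet2 a (↑k + 1) (↑j + 1))) (pvGIn colRows F k (n - 1))
        = pvG4 colRows F k
    rw [pv_foldr_range_eq
      (fun (j : ℕ) (a : List (List Int)) =>
        pvSet2 a (↑k) (↑j)
          (pvGet2 A (↑k) (↑j) + pvGet2 a (↑k + 1) (↑j) + pvGet2 a (↑k) (↑j + 1)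
            - pvGet2 a (↑k + 1) (↑j + 1)))
      (pvGIn colRows F k) (n - 1) stepIn]
    rw [pvGIn, pvG4, List.replicate_zero, List.nil_append, List.drop_zero,
      List.drop_eq_getElem_cons (show k < F.length by omega),
      ← List.getD_eq_getElem F ([] : List Int) (show k < F.length by omega)]
  rw [pv_foldr_range_eq
    (fun (k : ℕ) (a : List (List Int)) =>
      (List.range (n - 1)).foldr
        (fun (j : ℕ) (a : List (List Int)) =>
          pvSet2 a (↑k) (↑j)
            (pvGet2 A (↑k) (↑j) + pvGet2 a (↑k + 1) (↑j) + pvGet2 a (↑k) (↑j + 1)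
              - pvGet2 a (↑k + 1) (↑j + 1))) a)
    (pvG4 colRows F) (m - 1) step4]
  rw [pvG4, List.take_zero, List.drop_zero, List.nil_append, hFdef, pvF, hzrow, hrowsdef]

-- ===== VERDICT (by name: the statement is the Claim_ definition above) =====
theorem getA_sum_spec : Claim_equal_getA_sum := by
  intro A _ hA
  unfold Spec_getA_sum
  rw [a_eq_pvF A hA, alt_eq_pvF A hA]
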